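-- pv_equiv track=rewrite | github.com/adhishezio/Visual-Technical-Assistant | backend/services/vision.py | score_part_number
-- ===== SOURCE A (Python) =====
-- def score_part_number(candidate: str) -> int:
--     score = len(candidate)
--     if any(character.isalpha() for character in candidate) and any(
--         character.isdigit() for character in candidate
--     ):
--         score += 10
--     if "-" in candidate or "/" in candidate:
--         score += 5
--     return score
-- ===== SOURCE B (Python) =====
-- _BONUS = (0, 0, 0, 10, 5, 5, 5, 15)
--
--
-- def _category(ch):
--     if ch.isalpha():
--         return 1
--     if ch.isdigit():
--         return 2
--     if ch in "-/":
--         return 4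
--     return 0
--
--
-- def score_part_number(candidate: str) -> int:
--     mask = 0
--     for ch in candidate:
--         mask |= _category(ch)
--     return len(candidate) + _BONUS[mask]
-- ===== Notes on version B (the rewrite author's own statement) =====
-- stated objective: alternative
-- what changed: Replaces A's staged scans with conditional bonus additions by a table-driven arithmetical formulation: each character is classified into a power-of-two category, the categories are OR-ed into a 3-bit mask in one loop, and the total bonus is read from a precomputed 8-entry table indexed by the mask.
import Mathlib
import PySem

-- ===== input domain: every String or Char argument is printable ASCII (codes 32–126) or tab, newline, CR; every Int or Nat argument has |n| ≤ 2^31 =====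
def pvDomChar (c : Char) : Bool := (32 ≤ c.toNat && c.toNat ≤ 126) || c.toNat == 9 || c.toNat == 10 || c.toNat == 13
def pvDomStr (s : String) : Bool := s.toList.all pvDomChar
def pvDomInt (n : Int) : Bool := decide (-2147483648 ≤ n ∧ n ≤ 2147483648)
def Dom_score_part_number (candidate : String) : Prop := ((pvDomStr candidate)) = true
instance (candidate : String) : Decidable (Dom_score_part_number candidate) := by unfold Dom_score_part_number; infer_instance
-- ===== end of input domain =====

-- B replaces A's staged scans and conditional bonus additions with a bitmask of
-- character categories OR-ed in one loop and a precomputed 8-entry bonus table (alternative formulation, same O(n)).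


-- ===== PORT A =====
def score_part_number (candidate : String) : Int :=
  let cs := candidate.toList
  let score : Int := PySem.Chars.len cs
  let score := if cs.any PySem.Chars.isalpha && cs.any PySem.Chars.isdigit then score + 10 else score
  let score := if PySem.Chars.isIn ['-'] cs || PySem.Chars.isIn ['/'] cs then score + 5 else score
  score

-- ===== PORT B =====
def pvBonus : List Int := [0, 0, 0, 10, 5, 5, 5, 15]

def pvCategory (c : Char) : Nat :=
  if PySem.Chars.isalpha c then 1
  else if PySem.Chars.isdigit c then 2
  else if PySem.Chars.isIn [c] ['-', '/'] then 4
  else 0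

def score_part_number_alt (candidate : String) : Int :=
  let cs := candidate.toList
  let mask := cs.foldl (fun m c => m ||| pvCategory c) 0
  PySem.Chars.len cs + PySem.List.pyGetD pvBonus (mask : Int) 0

-- ===== PRECONDITION & SPEC =====
def Spec_score_part_number (candidate : String) (out : Int) : Prop := out = score_part_number_alt candidate
instance (candidate : String) (out : Int) : Decidable (Spec_score_part_number candidate out) := by unfold Spec_score_part_number; infer_instance

-- ===== CLAIM (what is proved, stated in full; the proofs are below) =====
def Claim_equal_score_part_number : Prop := ∀ (candidate : String), Dom_score_part_number candidate → Spec_score_part_number candidate (score_part_number candidate)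

-- ===== LEMMAS AND PROOFS =====

-- the three-bit category encoding of a whole list: bit 1 = has a letter, bit 2 = has a digit, bit 4 = has a separator
def pvEnc (cs : List Char) : Nat :=
  (if cs.any PySem.Chars.isalpha then 1 else 0) |||
  (if cs.any PySem.Chars.isdigit then 2 else 0) |||
  (if cs.any (fun c => PySem.Chars.isIn [c] ['-', '/']) then 4 else 0)

-- single-character 'c in "-/"' names the two separator characters
theorem sep_iff (c : Char) :
    PySem.Chars.isIn [c] ['-', '/'] = true ↔ c = '-' ∨ c = '/' := by
  rw [PySem.Chars.isIn_iff_infix, List.singleton_infix_iff]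
  simp

-- ASCII letters and digits are disjoint character ranges
theorem alpha_not_digit (c : Char) (h : PySem.Chars.isalpha c = true) :
    PySem.Chars.isdigit c = false := by
  simp only [PySem.Chars.isalpha, PySem.Chars.isupper, PySem.Chars.islower,
    Bool.or_eq_true, Bool.and_eq_true, decide_eq_true_eq, Char.le_def,
    UInt32.le_iff_toNat_le, show ('A':Char).val.toNat = 65 from rfl,
    show ('Z':Char).val.toNat = 90 from rfl, show ('a':Char).val.toNat = 97 from rfl,
    show ('z':Char).val.toNat = 122 from rfl] at h
  simp only [PySem.Chars.isdigit, Bool.and_eq_false_iff, decide_eq_false_iff_not, Char.le_def,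
    UInt32.le_iff_toNat_le, show ('0':Char).val.toNat = 48 from rfl,
    show ('9':Char).val.toNat = 57 from rfl]
  omega

-- OR-ing one character's category into the encoding of the rest gives the encoding of the whole
theorem cat_or_enc (c : Char) (cs : List Char) :
    pvCategory c ||| pvEnc cs = pvEnc (c :: cs) := by
  simp only [pvEnc, List.any_cons]
  by_cases h1 : PySem.Chars.isalpha c = true
  · have h2 := alpha_not_digit c h1
    have h3 : PySem.Chars.isIn [c] ['-', '/'] = false := by
      rw [Bool.eq_false_iff]
      intro ht
      rcases (sep_iff c).mp ht with rfl | rfl <;> exact absurd h1 (by decide)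
    simp only [pvCategory, h1, h2, h3, if_true, Bool.true_or, Bool.false_or]
    rcases cs.any PySem.Chars.isalpha <;>
      rcases cs.any PySem.Chars.isdigit <;>
        rcases cs.any (fun c => PySem.Chars.isIn [c] ['-', '/']) <;> decide
  · rw [Bool.not_eq_true] at h1
    by_cases h2 : PySem.Chars.isdigit c = true
    · have h3 : PySem.Chars.isIn [c] ['-', '/'] = false := by
        rw [Bool.eq_false_iff]
        intro ht
        rcases (sep_iff c).mp ht with rfl | rfl <;> exact absurd h2 (by decide)
      simp only [pvCategory, h1, h2, h3, Bool.true_or, Bool.false_or]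
      rcases cs.any PySem.Chars.isalpha <;>
        rcases cs.any PySem.Chars.isdigit <;>
          rcases cs.any (fun c => PySem.Chars.isIn [c] ['-', '/']) <;> decide
    · rw [Bool.not_eq_true] at h2
      by_cases h3 : PySem.Chars.isIn [c] ['-', '/'] = true
      · simp only [pvCategory, h1, h2, h3, Bool.true_or, Bool.false_or]
        rcases cs.any PySem.Chars.isalpha <;>
          rcases cs.any PySem.Chars.isdigit <;>
            rcases cs.any (fun c => PySem.Chars.isIn [c] ['-', '/']) <;> decide
      · rw [Bool.not_eq_true] at h3
        simp only [pvCategory, h1, h2, h3, Bool.false_or]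
        rcases cs.any PySem.Chars.isalpha <;>
          rcases cs.any PySem.Chars.isdigit <;>
            rcases cs.any (fun c => PySem.Chars.isIn [c] ['-', '/']) <;> decide

-- loop invariant: B's fold builds exactly the three-bit encoding on top of any start mask
theorem foldl_mask (cs : List Char) (m : Nat) :
    cs.foldl (fun m c => m ||| pvCategory c) m = m ||| pvEnc cs := by
  induction cs generalizing m with
  | nil => simp [pvEnc]
  | cons c cs ih =>
    rw [List.foldl_cons, ih, Nat.or_assoc, cat_or_enc]

-- B's per-character separator test agrees with A's two membership tests
theorem sep_any_eq (cs : List Char) :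
    cs.any (fun c => PySem.Chars.isIn [c] ['-', '/'])
      = (PySem.Chars.isIn ['-'] cs || PySem.Chars.isIn ['/'] cs) := by
  rw [Bool.eq_iff_iff]
  simp only [List.any_eq_true, Bool.or_eq_true, PySem.Chars.isIn_iff_infix,
    List.singleton_infix_iff, List.mem_cons, List.not_mem_nil, or_false]
  constructor
  · rintro ⟨c, hc, rfl | rfl⟩
    · exact Or.inl hc
    · exact Or.inr hc
  · rintro (h | h)
    · exact ⟨'-', h, Or.inl rfl⟩
    · exact ⟨'/', h, Or.inr rfl⟩

-- ===== VERDICT (by name: the statement is the Claim_ definition above) =====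
theorem score_part_number_spec : Claim_equal_score_part_number := by
  intro candidate _
  unfold Spec_score_part_number score_part_number score_part_number_alt
  dsimp only
  rw [foldl_mask, Nat.zero_or, PySem.List.pyGetD_natCast, ← sep_any_eq]
  rcases ha : (candidate.toList).any PySem.Chars.isalpha <;>
    rcases hd : (candidate.toList).any PySem.Chars.isdigit <;>
      rcases hs : (candidate.toList).any (fun c => PySem.Chars.isIn [c] ['-', '/']) <;>
        simp [pvEnc, ha, hd, hs, pvBonus] <;> omega
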